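-- pv_equiv track=rewrite | github.com/compbiolabucf/IntMTQ | read_counts.py | gene_info
-- ===== SOURCE A (Python) =====
-- def gene_info(G,GeneNames,TranscriptNames,TranscriptStart,TranscriptEnd,Chr):
-- 	'''
-- 	Check start and end position of each gene.
-- 	Prepare isoform name and isoform length corresponding to each gene in G.
--
-- 	Args:
-- 	G: unique gene list;
-- 	GeneNames,TranscriptNames,TranscriptStart,TranscriptEnd,Chr (from hg19 annotation)
--
-- 	Return:  (all corresponding to each gene in G)
-- 	Gene_S: gene start position; Gene_E: gene end position; Gene_Chr: chromsone of each gene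
-- 	T: list of transcript names; L: transcript length
--
-- 	'''
-- 	Gene_S = []
-- 	Gene_E = []
-- 	Gene_Chr = []
-- 	T = []   # isoform name of each gene
-- 	L = []   # isoform length of each gene
-- 	for g in G:
-- 		IDX = [index for index,item in enumerate(GeneNames) if item == g]
-- 		a = [TranscriptStart[idx] for idx in IDX]
-- 		b = [TranscriptEnd[idx] for idx in IDX]
-- 		c = [Chr[idx] for idx in IDX]
-- 		Gene_S.append(min(a))
-- 		Gene_E.append(max(b))
-- 		Gene_Chr.append(c[0])
-- 		t = [TranscriptNames[idx] for idx in IDX]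
-- 		T.append(t)
-- 		l = [abs(TranscriptEnd[idx]-TranscriptStart[idx]) for idx in IDX]
-- 		L.append(l)
--
-- 	return Gene_S,Gene_E,Gene_Chr,T,L
-- ===== SOURCE B (Python) =====
-- def gene_info(G, GeneNames, TranscriptNames, TranscriptStart, TranscriptEnd, Chr):
--     # One pass over the annotation rows, grouping by gene name into a dict,
--     # then one lookup per gene in G.  O(|GeneNames| + |G|) instead of O(|G|*|GeneNames|).
--     groups = {}
--     for i, g in enumerate(GeneNames):
--         s = TranscriptStart[i]
--         e = TranscriptEnd[i]
--         if g in groups: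
--             rec = groups[g]
--             rec[0] = min(rec[0], s)
--             rec[1] = max(rec[1], e)
--             rec[3].append(TranscriptNames[i])
--             rec[4].append(abs(e - s))
--         else:
--             groups[g] = [s, e, Chr[i], [TranscriptNames[i]], [abs(e - s)]]
--     Gene_S = []
--     Gene_E = []
--     Gene_Chr = []
--     T = []
--     L = []
--     for g in G:
--         s, e, c, t, l = groups[g]
--         Gene_S.append(s)
--         Gene_E.append(e)
--         Gene_Chr.append(c)
--         T.append(t)
--         L.append(l)
--     return Gene_S, Gene_E, Gene_Chr, T, L
-- ===== Notes on version B (the rewrite author's own statement) =====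
-- stated objective: faster
-- what changed: Replaces A's per-gene rescan of GeneNames (building an index list and four comprehensions for every gene) with a single pass over the annotation rows that groups min-start/max-end/first-chr/names/lengths into a dict, followed by one O(1) lookup per gene in G.
-- outside the precondition, e.g. on gene_info([], ['a'], [], [], [], []): A returns ([], [], [], [], []), B raises IndexError
import Mathlib
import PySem

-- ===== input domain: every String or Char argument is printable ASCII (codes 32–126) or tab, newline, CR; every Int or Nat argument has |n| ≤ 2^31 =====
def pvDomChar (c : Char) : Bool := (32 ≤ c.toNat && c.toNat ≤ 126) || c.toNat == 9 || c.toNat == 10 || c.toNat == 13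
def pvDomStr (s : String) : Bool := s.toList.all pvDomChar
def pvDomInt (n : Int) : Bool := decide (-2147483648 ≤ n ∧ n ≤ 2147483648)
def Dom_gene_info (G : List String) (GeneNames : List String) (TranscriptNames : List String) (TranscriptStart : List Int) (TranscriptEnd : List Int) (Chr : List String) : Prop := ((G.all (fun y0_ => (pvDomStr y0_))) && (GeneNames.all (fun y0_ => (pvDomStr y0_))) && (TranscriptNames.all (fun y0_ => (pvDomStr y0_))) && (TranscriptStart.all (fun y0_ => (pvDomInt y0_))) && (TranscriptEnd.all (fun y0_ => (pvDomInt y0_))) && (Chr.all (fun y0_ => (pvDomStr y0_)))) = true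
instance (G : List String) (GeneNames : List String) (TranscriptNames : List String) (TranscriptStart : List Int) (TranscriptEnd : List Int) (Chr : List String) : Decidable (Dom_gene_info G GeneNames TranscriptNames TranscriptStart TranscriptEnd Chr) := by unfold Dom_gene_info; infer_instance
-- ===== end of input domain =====

-- B replaces A's per-gene rescan of GeneNames with one dict-grouping pass over the
-- annotation rows plus one lookup per gene (asymptotically faster in a timing run).


-- ===== PORT A =====
-- Literal port of A: for each g in G, scan enumerate(GeneNames) for matching indices,
-- then build a/b/c/t/l by indexing the four annotation lists at those indices.
def gene_info (G : List String) (GeneNames : List String) (TranscriptNames : List String) (TranscriptStart : List Int) (TranscriptEnd : List Int) (Chr : List String) : List Int × List Int × List String × List (List String) × List (List Int) :=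
  List.foldl
    (fun acc g =>
      let IDX := (List.filter (fun p => p.2 == g) (PySem.List.enumerate GeneNames)).map (·.1)
      let a := IDX.map (fun idx => PySem.List.pyGetD TranscriptStart idx 0)
      let b := IDX.map (fun idx => PySem.List.pyGetD TranscriptEnd idx 0)
      let c := IDX.map (fun idx => PySem.List.pyGetD Chr idx "")
      let t := IDX.map (fun idx => PySem.List.pyGetD TranscriptNames idx "")
      let l := IDX.map (fun idx => |PySem.List.pyGetD TranscriptEnd idx 0 - PySem.List.pyGetD TranscriptStart idx 0|)
      (acc.1 ++ [(PySem.List.min? a (fun x => x)).getD 0],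
       acc.2.1 ++ [(PySem.List.max? b (fun x => x)).getD 0],
       acc.2.2.1 ++ [c.headD ""],
       acc.2.2.2.1 ++ [t],
       acc.2.2.2.2 ++ [l]))
    ([], [], [], [], []) G

-- ===== PORT B =====
-- One grouping step of Source B's first loop: dict entry is (min start, max end, first chr, names, lengths).
def giStep (TranscriptNames : List String) (TranscriptStart : List Int) (TranscriptEnd : List Int) (Chr : List String)
    (d : PySem.Dict String (Int × Int × String × List String × List Int)) (p : Int × String) :
    PySem.Dict String (Int × Int × String × List String × List Int) :=
  let s := PySem.List.pyGetD TranscriptStart p.1 0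
  let e := PySem.List.pyGetD TranscriptEnd p.1 0
  match PySem.Dict.get? d p.2 with
  | some r => PySem.Dict.insert d p.2 (min r.1 s, max r.2.1 e, r.2.2.1,
      r.2.2.2.1 ++ [PySem.List.pyGetD TranscriptNames p.1 ""], r.2.2.2.2 ++ [|e - s|])
  | none => PySem.Dict.insert d p.2 (s, e, PySem.List.pyGetD Chr p.1 "",
      [PySem.List.pyGetD TranscriptNames p.1 ""], [|e - s|])

def gene_info_alt (G : List String) (GeneNames : List String) (TranscriptNames : List String) (TranscriptStart : List Int) (TranscriptEnd : List Int) (Chr : List String) : List Int × List Int × List String × List (List String) × List (List Int) :=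
  let groups := (PySem.List.enumerate GeneNames).foldl (giStep TranscriptNames TranscriptStart TranscriptEnd Chr) PySem.Dict.empty
  List.foldl
    (fun acc g =>
      (acc.1 ++ [((PySem.Dict.get? groups g).getD (0, 0, "", [], [])).1],
       acc.2.1 ++ [((PySem.Dict.get? groups g).getD (0, 0, "", [], [])).2.1],
       acc.2.2.1 ++ [((PySem.Dict.get? groups g).getD (0, 0, "", [], [])).2.2.1],
       acc.2.2.2.1 ++ [((PySem.Dict.get? groups g).getD (0, 0, "", [], [])).2.2.2.1],
       acc.2.2.2.2 ++ [((PySem.Dict.get? groups g).getD (0, 0, "", [], [])).2.2.2.2]))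
    ([], [], [], [], []) G

-- ===== PRECONDITION & SPEC =====
-- Pre_ excludes (a) inputs where some gene of G never occurs in GeneNames (Python A raises
-- ValueError on min([])) and (b) inputs whose annotation columns are shorter than GeneNames:
-- these columns are parallel by the function's purpose, and on such malformed input A raises
-- IndexError unless every match happens to fall in range (the cite in claim.json is one such
-- excluded input on which A still returns while B raises IndexError in its single pass).
def Pre_gene_info (G : List String) (GeneNames : List String) (TranscriptNames : List String) (TranscriptStart : List Int) (TranscriptEnd : List Int) (Chr : List String) : Prop :=
  (∀ g ∈ G, g ∈ GeneNames) ∧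
  GeneNames.length ≤ TranscriptNames.length ∧
  GeneNames.length ≤ TranscriptStart.length ∧
  GeneNames.length ≤ TranscriptEnd.length ∧
  GeneNames.length ≤ Chr.length
instance (G : List String) (GeneNames : List String) (TranscriptNames : List String) (TranscriptStart : List Int) (TranscriptEnd : List Int) (Chr : List String) : Decidable (Pre_gene_info G GeneNames TranscriptNames TranscriptStart TranscriptEnd Chr) := by unfold Pre_gene_info; infer_instance

def pvWitness_gene_info : List String × List String × List String × List Int × List Int × List String :=
  (["a", "b"], ["a", "b", "a"], ["t1", "t2", "t3"], [4, 3, 1], [5, 4, 2], ["c1", "c2", "c1"])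

def Spec_gene_info (G : List String) (GeneNames : List String) (TranscriptNames : List String) (TranscriptStart : List Int) (TranscriptEnd : List Int) (Chr : List String) (out : List Int × List Int × List String × List (List String) × List (List Int)) : Prop := out = gene_info_alt G GeneNames TranscriptNames TranscriptStart TranscriptEnd Chr
instance (G : List String) (GeneNames : List String) (TranscriptNames : List String) (TranscriptStart : List Int) (TranscriptEnd : List Int) (Chr : List String) (out : List Int × List Int × List String × List (List String) × List (List Int)) : Decidable (Spec_gene_info G GeneNames TranscriptNames TranscriptStart TranscriptEnd Chr out) := by unfold Spec_gene_info; infer_instance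

-- ===== CLAIM (what is proved, stated in full; the proofs are below) =====
def Claim_equal_gene_info : Prop := ∀ (G : List String) (GeneNames : List String) (TranscriptNames : List String) (TranscriptStart : List Int) (TranscriptEnd : List Int) (Chr : List String), Dom_gene_info G GeneNames TranscriptNames TranscriptStart TranscriptEnd Chr → Pre_gene_info G GeneNames TranscriptNames TranscriptStart TranscriptEnd Chr → Spec_gene_info G GeneNames TranscriptNames TranscriptStart TranscriptEnd Chr (gene_info G GeneNames TranscriptNames TranscriptStart TranscriptEnd Chr)

-- ===== LEMMAS AND PROOFS =====

-- the record merged into the dict for a fresh row p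
def giEntry (TranscriptNames : List String) (TranscriptStart : List Int) (TranscriptEnd : List Int) (Chr : List String) (p : Int × String) : Int × Int × String × List String × List Int :=
  (PySem.List.pyGetD TranscriptStart p.1 0, PySem.List.pyGetD TranscriptEnd p.1 0,
   PySem.List.pyGetD Chr p.1 "", [PySem.List.pyGetD TranscriptNames p.1 ""],
   [|PySem.List.pyGetD TranscriptEnd p.1 0 - PySem.List.pyGetD TranscriptStart p.1 0|])

-- merging a further row p into an existing record
def giMerge (TranscriptNames : List String) (TranscriptStart : List Int) (TranscriptEnd : List Int)
    (r : Int × Int × String × List String × List Int) (p : Int × String) : Int × Int × String × List String × List Int :=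
  (min r.1 (PySem.List.pyGetD TranscriptStart p.1 0), max r.2.1 (PySem.List.pyGetD TranscriptEnd p.1 0), r.2.2.1,
   r.2.2.2.1 ++ [PySem.List.pyGetD TranscriptNames p.1 ""],
   r.2.2.2.2 ++ [|PySem.List.pyGetD TranscriptEnd p.1 0 - PySem.List.pyGetD TranscriptStart p.1 0|])

def giUpd (TranscriptNames : List String) (TranscriptStart : List Int) (TranscriptEnd : List Int) (Chr : List String)
    (o : Option (Int × Int × String × List String × List Int)) (p : Int × String) : Option (Int × Int × String × List String × List Int) :=
  some (match o with
        | none => giEntry TranscriptNames TranscriptStart TranscriptEnd Chr p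
        | some r => giMerge TranscriptNames TranscriptStart TranscriptEnd r p)

lemma giStep_eq (TN : List String) (TS TE : List Int) (C : List String) (d : PySem.Dict String (Int × Int × String × List String × List Int)) (p : Int × String) :
    giStep TN TS TE C d p = PySem.Dict.insert d p.2 ((giUpd TN TS TE C (PySem.Dict.get? d p.2) p).getD default) := by
  simp only [giStep, giUpd, giEntry, giMerge]
  cases PySem.Dict.get? d p.2 <;> rfl

-- dict invariant of Source B's grouping loop
lemma giFold_get? (TN : List String) (TS TE : List Int) (C : List String) (g : String) :
    ∀ (ps : List (Int × String)) (d : PySem.Dict String (Int × Int × String × List String × List Int)),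
      PySem.Dict.get? (ps.foldl (giStep TN TS TE C) d) g =
        (ps.filter (fun p => p.2 == g)).foldl (giUpd TN TS TE C) (PySem.Dict.get? d g) := by
  intro ps
  induction ps with
  | nil => intro d; simp
  | cons p ps ih =>
    intro d
    by_cases h : p.2 = g
    · subst h
      simp only [List.foldl_cons, List.filter_cons, BEq.rfl, if_pos]
      rw [ih, giStep_eq]
      rw [PySem.Dict.get?_insert_self]
      simp [giUpd]
    · simp only [List.foldl_cons, List.filter_cons]
      rw [if_neg (by simpa using h)]
      rw [ih, giStep_eq, PySem.Dict.get?_insert_of_ne _ _ (fun hh => h hh.symm)]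

lemma giUpd_foldl_some (TN : List String) (TS TE : List Int) (C : List String) :
    ∀ (ps : List (Int × String)) (r : Int × Int × String × List String × List Int),
      ps.foldl (giUpd TN TS TE C) (some r) = some (ps.foldl (giMerge TN TS TE) r) := by
  intro ps
  induction ps with
  | nil => intro r; rfl
  | cons p ps ih => intro r; simp only [List.foldl_cons, giUpd]; exact ih _

-- closed form of the merge fold
lemma giMerge_foldl (TN : List String) (TS TE : List Int) :
    ∀ (ps : List (Int × String)) (r : Int × Int × String × List String × List Int),
      ps.foldl (giMerge TN TS TE) r =
        (ps.foldl (fun a q => min a (PySem.List.pyGetD TS q.1 0)) r.1,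
         ps.foldl (fun a q => max a (PySem.List.pyGetD TE q.1 0)) r.2.1,
         r.2.2.1,
         r.2.2.2.1 ++ ps.map (fun q => PySem.List.pyGetD TN q.1 ""),
         r.2.2.2.2 ++ ps.map (fun q => |PySem.List.pyGetD TE q.1 0 - PySem.List.pyGetD TS q.1 0|)) := by
  intro ps
  induction ps with
  | nil => intro r; simp
  | cons p ps ih =>
    intro r
    simp only [List.foldl_cons, List.map_cons, ih, giMerge]
    simp [List.append_assoc]

-- generic shape of both output-building folds
lemma gi_foldl_map {α β1 β2 β3 β4 β5 : Type} (f1 : α → β1) (f2 : α → β2) (f3 : α → β3) (f4 : α → β4) (f5 : α → β5) :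
    ∀ (G : List α) (acc : List β1 × List β2 × List β3 × List β4 × List β5),
      G.foldl (fun acc g => (acc.1 ++ [f1 g], acc.2.1 ++ [f2 g], acc.2.2.1 ++ [f3 g], acc.2.2.2.1 ++ [f4 g], acc.2.2.2.2 ++ [f5 g])) acc
        = (acc.1 ++ G.map f1, acc.2.1 ++ G.map f2, acc.2.2.1 ++ G.map f3, acc.2.2.2.1 ++ G.map f4, acc.2.2.2.2 ++ G.map f5) := by
  intro G
  induction G with
  | nil => intro acc; simp
  | cons g G ih => intro acc; simp only [List.foldl_cons, List.map_cons, ih]; simp [List.append_assoc]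

-- A's per-gene tuple equals B's dict lookup for that gene
lemma per_gene (GN TN : List String) (TS TE : List Int) (C : List String) (g : String) :
    (let IDX := (List.filter (fun p => p.2 == g) (PySem.List.enumerate GN)).map (·.1)
     ((PySem.List.min? (IDX.map (fun idx => PySem.List.pyGetD TS idx 0)) (fun x => x)).getD 0,
      (PySem.List.max? (IDX.map (fun idx => PySem.List.pyGetD TE idx 0)) (fun x => x)).getD 0,
      (IDX.map (fun idx => PySem.List.pyGetD C idx "")).headD "",
      IDX.map (fun idx => PySem.List.pyGetD TN idx ""),
      IDX.map (fun idx => |PySem.List.pyGetD TE idx 0 - PySem.List.pyGetD TS idx 0|)))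
    = (PySem.Dict.get? ((PySem.List.enumerate GN).foldl (giStep TN TS TE C) PySem.Dict.empty) g).getD (0, 0, "", [], []) := by
  rw [giFold_get?]
  rw [PySem.Dict.get?_empty]
  cases hM : (PySem.List.enumerate GN).filter (fun p => p.2 == g) with
  | nil => simp [PySem.List.min?, PySem.List.max?]
  | cons p ps =>
    simp only [List.foldl_cons]
    have h1 : giUpd TN TS TE C none p = some (giEntry TN TS TE C p) := rfl
    rw [h1, giUpd_foldl_some, Option.getD_some, giMerge_foldl]
    simp only [List.map_cons, List.map_map]
    rw [PySem.List.min?_id_cons, PySem.List.max?_id_cons]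
    simp only [Option.getD_some, List.foldl_map, giEntry, List.headD_cons]
    simp [Function.comp_def]

theorem ports_agree (G GN TN : List String) (TS TE : List Int) (C : List String) :
    gene_info G GN TN TS TE C = gene_info_alt G GN TN TS TE C := by
  simp only [gene_info, gene_info_alt]
  rw [gi_foldl_map, gi_foldl_map]
  simp only [List.nil_append, Prod.mk.injEq]
  refine ⟨?_, ?_, ?_, ?_, ?_⟩ <;>
  · apply List.map_congr_left
    intro g _
    have h := per_gene GN TN TS TE C g
    simp only at h
    first
      | exact congrArg (fun x => x.1) h
      | exact congrArg (fun x => x.2.1) h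
      | exact congrArg (fun x => x.2.2.1) h
      | exact congrArg (fun x => x.2.2.2.1) h
      | exact congrArg (fun x => x.2.2.2.2) h

-- ===== VERDICT (by name: the statement is the Claim_ definition above) =====
theorem gene_info_spec : Claim_equal_gene_info := by
  intro G GN TN TS TE C _ _
  unfold Spec_gene_info
  exact ports_agree G GN TN TS TE C
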